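-- pv_equiv track=rewrite | github.com/sfilipov/aoc2024 | day03/main.py | sum_tokens
-- ===== SOURCE A (Python) =====
-- def tokenizer(s: str):
--     n = len(s)
--     tokens = []
--     i = 0
--     while i < n:
--         if s[i : i + 4] == "mul(":
--             tokens.append("mul(")
--             i += 4
--         elif s[i : i + 4] == "do()":
--             tokens.append("do()")
--             i += 4
--         elif s[i : i + 7] == "don't()":
--             tokens.append("don't()")
--             i += 7
--         elif s[i].isdigit():
--             end = i
--             while end < n and s[end].isdigit():
--                 end += 1
--             tokens.append(s[i:end])
--             i = end
--         else:
--             tokens.append(s[i])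
--             i += 1
--     return tokens
--
-- def sum_tokens(lines, force_enabled):
--     result = 0
--     enabled = True
--     for line in lines:
--         tokens = tokenizer(line)
--         i = 0
--         while i < len(tokens):
--             if tokens[i] == "do()":
--                 enabled = True
--                 i += 1
--             elif tokens[i] == "don't()":
--                 enabled = False
--                 i += 1
--             elif (
--                 i + 4 < len(tokens)
--                 and tokens[i] == "mul("
--                 and tokens[i + 1].isdigit()
--                 and tokens[i + 2] == ","
--                 and tokens[i + 3].isdigit()
--                 and tokens[i + 4] == ")"
--             ):
--                 if enabled or force_enabled:
--                     result += int(tokens[i + 1]) * int(tokens[i + 3])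
--                 i += 5
--             else:
--                 i += 1
--     return result
-- ===== SOURCE B (Python) =====
-- def _try_mul(s, i):
--     # parse "mul(<digits>,<digits>)" starting at i; return (product, index after ')') or None
--     if not s.startswith("mul(", i):
--         return None
--     j = i + 4
--     a = j
--     while j < len(s) and s[j].isdigit():
--         j += 1
--     if j == a or j >= len(s) or s[j] != ',':
--         return None
--     x = int(s[a:j])
--     j += 1
--     b = j
--     while j < len(s) and s[j].isdigit():
--         j += 1
--     if j == b or j >= len(s) or s[j] != ')':
--         return None
--     return x * int(s[b:j]), j + 1
--
--
-- def sum_tokens(lines, force_enabled):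
--     # single pass over the characters: no intermediate token list
--     result = 0
--     enabled = True
--     for line in lines:
--         i, n = 0, len(line)
--         while i < n:
--             m = _try_mul(line, i)
--             if m is not None:
--                 if enabled or force_enabled:
--                     result += m[0]
--                 i = m[1]
--             elif line.startswith("do()", i):
--                 enabled = True
--                 i += 4
--             elif line.startswith("don't()", i):
--                 enabled = False
--                 i += 7
--             else:
--                 i += 1
--     return result
-- ===== Notes on version B (the rewrite author's own statement) =====
-- stated objective: simpler
-- what changed: A tokenizes each line into an intermediate token list and then parses that list with a 5-token lookahead; B deletes the token list entirely and does one direct left-to-right scan over the characters, parsing mul(d+,d+)/do()/don't() in place.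
import Mathlib
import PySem

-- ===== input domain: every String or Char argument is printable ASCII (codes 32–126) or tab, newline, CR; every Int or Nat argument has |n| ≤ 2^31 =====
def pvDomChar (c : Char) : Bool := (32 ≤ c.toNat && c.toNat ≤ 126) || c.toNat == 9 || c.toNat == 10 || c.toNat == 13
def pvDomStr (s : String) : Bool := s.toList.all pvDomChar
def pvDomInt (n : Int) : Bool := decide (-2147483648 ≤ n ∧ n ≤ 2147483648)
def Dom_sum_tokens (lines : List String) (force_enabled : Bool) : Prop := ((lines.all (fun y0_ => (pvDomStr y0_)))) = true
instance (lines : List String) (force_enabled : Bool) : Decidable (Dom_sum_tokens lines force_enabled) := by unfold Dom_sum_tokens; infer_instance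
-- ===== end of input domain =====

-- B replaces A's two-phase tokenize-then-parse with a single left-to-right scan of the characters
-- (no intermediate token list); objective: simpler. Return value only; neither program mutates its input.

-- int(tok) on a nonempty all-digit ASCII token (both Pythons only call int on such tokens; exact there)
def digitsVal (ds : List Char) : Int := ds.foldl (fun a c => a * 10 + ((c.toNat : Int) - 48)) 0

-- ===== PORT A =====
-- tokenizer: while-loop over the string, one token per step (slices s[i:i+k] are `take k` of the suffix;
-- the inner digit-run while loop is takeWhile/dropWhile of the suffix; Chars.isdigit = str.isdigit, exact on ASCII)
def tokenizerA (s : List Char) : List (List Char) :=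
  match s with
  | [] => []
  | c :: rest =>
    if (c :: rest).take 4 = "mul(".toList then
      "mul(".toList :: tokenizerA ((c :: rest).drop 4)
    else if (c :: rest).take 4 = "do()".toList then
      "do()".toList :: tokenizerA ((c :: rest).drop 4)
    else if (c :: rest).take 7 = "don't()".toList then
      "don't()".toList :: tokenizerA ((c :: rest).drop 7)
    else if PySem.Chars.isdigit c then
      (c :: rest.takeWhile PySem.Chars.isdigit) :: tokenizerA (rest.dropWhile PySem.Chars.isdigit)
    else
      [c] :: tokenizerA rest
termination_by s.length
decreasing_by
  all_goals
    (have := List.length_dropWhile_le (p := PySem.Chars.isdigit) (l := rest); simp <;> omega)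

-- the parser while loop over the token list: `i + 4 < len(tokens)` + the 5-token lookahead is the
-- 5-deep cons pattern; branch order as in Python
def parseA (force : Bool) : List (List Char) → Bool → Int → Int × Bool
  | [], en, res => (res, en)
  | t :: ts, en, res =>
    if t = "do()".toList then parseA force ts true res
    else if t = "don't()".toList then parseA force ts false res
    else
      match ts with
      | t1 :: t2 :: t3 :: t4 :: ts' =>
        if t = "mul(".toList ∧ PySem.Chars.strIsdigit t1 = true ∧ t2 = [','] ∧
            PySem.Chars.strIsdigit t3 = true ∧ t4 = [')'] then
          parseA force ts' en (if en || force then res + digitsVal t1 * digitsVal t3 else res)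
        else parseA force (t1 :: t2 :: t3 :: t4 :: ts') en res
      | short => parseA force short en res

def sum_tokens (lines : List String) (force_enabled : Bool) : Int :=
  (lines.foldl (fun (st : Int × Bool) line =>
    parseA force_enabled (tokenizerA line.toList) st.2 st.1) ((0 : Int), true)).1

-- ===== PORT B =====
-- _try_mul: parse "mul(<digits>,<digits>)" at the head of the suffix; returns the product and the rest
def tryMul (s : List Char) : Option (Int × List Char) :=
  if PySem.Chars.startswith s "mul(".toList then
    if (s.drop 4).takeWhile PySem.Chars.isdigit = [] then none
    else
      match (s.drop 4).dropWhile PySem.Chars.isdigit with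
      | ',' :: t2 =>
        if t2.takeWhile PySem.Chars.isdigit = [] then none
        else
          match t2.dropWhile PySem.Chars.isdigit with
          | ')' :: t3 =>
            some (digitsVal ((s.drop 4).takeWhile PySem.Chars.isdigit) *
              digitsVal (t2.takeWhile PySem.Chars.isdigit), t3)
          | _ => none
      | _ => none
  else none

theorem tryMul_length {s : List Char} {v : Int} {r : List Char}
    (h : tryMul s = some (v, r)) : r.length < s.length := by
  unfold tryMul at h
  split at h
  case isFalse => simp at h
  case isTrue hpre =>
    have h4 : 4 ≤ s.length := by
      have := (PySem.Chars.startswith_iff _ _).1 hpre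
      have := this.length_le
      simpa using this
    split at h
    · simp at h
    · split at h
      case h_2 => simp at h
      case h_1 t2 heq2 =>
        split at h
        · simp at h
        · split at h
          case h_2 => simp at h
          case h_1 t3 heq3 =>
            simp only [Option.some.injEq, Prod.mk.injEq] at h
            obtain ⟨-, rfl⟩ := h
            have l2 : ((s.drop 4).dropWhile PySem.Chars.isdigit).length ≤ (s.drop 4).length :=
              List.length_dropWhile_le _ _
            have l3 : (t2.dropWhile PySem.Chars.isdigit).length ≤ t2.length :=
              List.length_dropWhile_le _ _
            rw [heq2] at l2
            rw [heq3] at l3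
            simp only [List.length_cons, List.length_drop] at *
            omega

-- the single-pass scanner: try mul at this position, else do()/don't(), else step one char
def scanB (force : Bool) (s : List Char) (en : Bool) (res : Int) : Int × Bool :=
  match s with
  | [] => (res, en)
  | c :: rest =>
    match h : tryMul (c :: rest) with
    | some (v, r) => scanB force r en (if en || force then res + v else res)
    | none =>
      if PySem.Chars.startswith (c :: rest) "do()".toList then
        scanB force ((c :: rest).drop 4) true res
      else if PySem.Chars.startswith (c :: rest) "don't()".toList then
        scanB force ((c :: rest).drop 7) false res
      else scanB force rest en res
termination_by s.length
decreasing_by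
  · exact tryMul_length h
  all_goals (simp <;> omega)

def sum_tokens_alt (lines : List String) (force_enabled : Bool) : Int :=
  (lines.foldl (fun (st : Int × Bool) line =>
    scanB force_enabled line.toList st.2 st.1) ((0 : Int), true)).1

-- ===== PRECONDITION & SPEC =====
def Spec_sum_tokens (lines : List String) (force_enabled : Bool) (out : Int) : Prop := out = sum_tokens_alt lines force_enabled
instance (lines : List String) (force_enabled : Bool) (out : Int) : Decidable (Spec_sum_tokens lines force_enabled out) := by unfold Spec_sum_tokens; infer_instance

-- ===== CLAIM (what is proved, stated in full; the proofs are below) =====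
def Claim_equal_sum_tokens : Prop := ∀ (lines : List String) (force_enabled : Bool), Dom_sum_tokens lines force_enabled → Spec_sum_tokens lines force_enabled (sum_tokens lines force_enabled)

-- ===== LEMMAS AND PROOFS =====

theorem startswith_iff_take (s p : List Char) :
    PySem.Chars.startswith s p = true ↔ s.take p.length = p := by
  rw [PySem.Chars.startswith_iff, List.prefix_iff_eq_take]; exact eq_comm

theorem startswith_cons_false {c a : Char} (rest p' : List Char) (h : a ≠ c) :
    PySem.Chars.startswith (c :: rest) (a :: p') = false := by
  rw [Bool.eq_false_iff, Ne, PySem.Chars.startswith_iff, List.cons_prefix_cons]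
  rintro ⟨rfl, -⟩; exact h rfl

theorem sw_mul_false {c : Char} (rest : List Char) (h : c ≠ 'm') :
    PySem.Chars.startswith (c :: rest) "mul(".toList = false := by
  rw [show "mul(".toList = 'm' :: ['u', 'l', '('] from rfl]
  exact startswith_cons_false rest _ (fun he => h he.symm)

theorem sw_do_false {c : Char} (rest : List Char) (h : c ≠ 'd') :
    PySem.Chars.startswith (c :: rest) ['d', 'o', '(', ')'] = false :=
  startswith_cons_false rest _ (fun he => h he.symm)

theorem sw_dont_false {c : Char} (rest : List Char) (h : c ≠ 'd') :
    PySem.Chars.startswith (c :: rest) ['d', 'o', 'n', '\'', 't', '(', ')'] = false :=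
  startswith_cons_false rest _ (fun he => h he.symm)

theorem tryMul_none_of_head {c : Char} (rest : List Char) (h : c ≠ 'm') :
    tryMul (c :: rest) = none := by
  unfold tryMul
  rw [sw_mul_false rest h]
  rfl

-- one non-trigger character: the scanner just steps over it
theorem scanB_step (force : Bool) {c : Char} (rest : List Char) (en : Bool) (res : Int)
    (hm : c ≠ 'm') (hd : c ≠ 'd') :
    scanB force (c :: rest) en res = scanB force rest en res := by
  rw [scanB, tryMul_none_of_head rest hm]
  simp [sw_do_false rest hd, sw_dont_false rest hd]

theorem scanB_dropWhile_digits (force : Bool) (l : List Char) (en : Bool) (res : Int) :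
    scanB force l en res = scanB force (l.dropWhile PySem.Chars.isdigit) en res := by
  induction l with
  | nil => rfl
  | cons c rest ih =>
    by_cases hc : PySem.Chars.isdigit c = true
    · rw [List.dropWhile_cons_of_pos hc, scanB_step force rest en res
        (fun he => by subst he; exact absurd hc (by decide))
        (fun he => by subst he; exact absurd hc (by decide)), ih]
    · rw [List.dropWhile_cons_of_neg hc]

-- parser skip lemmas: one token that starts no instruction is passed over
theorem parseA_skip (force : Bool) {t : List Char} (ts : List (List Char)) (en : Bool) (res : Int)
    (h1 : t ≠ "do()".toList) (h2 : t ≠ "don't()".toList) (h3 : t ≠ "mul(".toList) :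
    parseA force (t :: ts) en res = parseA force ts en res := by
  have h1' : t ≠ ['d', 'o', '(', ')'] := h1
  have h2' : t ≠ ['d', 'o', 'n', '\'', 't', '(', ')'] := h2
  have h3' : t ≠ ['m', 'u', 'l', '('] := h3
  rcases ts with _ | ⟨t1, _ | ⟨t2, _ | ⟨t3, _ | ⟨t4, ts'⟩⟩⟩⟩ <;>
    simp [parseA, h1', h2', h3']

-- first token of the tokenizer output at a non-digit position is never itself a digit token
theorem tok_head_not_digit (c : Char) (t' : List Char) (h : PySem.Chars.isdigit c = false) :
    ∃ t1 ts, tokenizerA (c :: t') = t1 :: ts ∧ PySem.Chars.strIsdigit t1 = false := by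
  rw [tokenizerA]
  split_ifs with h1 h2 h3 h4
  · exact ⟨_, _, rfl, by decide⟩
  · exact ⟨_, _, rfl, by decide⟩
  · exact ⟨_, _, rfl, by decide⟩
  · rw [h] at h4; cases h4
  · exact ⟨[c], _, rfl, by simp [PySem.Chars.strIsdigit, h]⟩

-- a single plain character (not m/d, not a digit) becomes its own token
theorem tok_single {c : Char} (t : List Char) (hm : c ≠ 'm') (hd : c ≠ 'd')
    (hdig : PySem.Chars.isdigit c = false) :
    tokenizerA (c :: t) = [c] :: tokenizerA t := by
  rw [tokenizerA]
  rw [if_neg (by simp [List.take_succ_cons, hm]),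
    if_neg (by simp [List.take_succ_cons, hd]),
    if_neg (by simp [List.take_succ_cons, hd]),
    if_neg (by simp [hdig])]

-- first token at a position whose character is not `a` (single char) is never the token [a]
theorem tok_head_ne_single (c : Char) (t' : List Char) (a : Char) (h : c ≠ a) :
    ∃ t1 ts, tokenizerA (c :: t') = t1 :: ts ∧ t1 ≠ [a] := by
  rw [tokenizerA]
  split_ifs with h1 h2 h3 h4
  · exact ⟨_, _, rfl, by simp⟩
  · exact ⟨_, _, rfl, by simp⟩
  · exact ⟨_, _, rfl, by simp⟩
  · exact ⟨_, _, rfl, by simp [h]⟩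
  · exact ⟨[c], _, rfl, by simp [h]⟩

-- the tokenizer at a digit position emits the maximal digit run
theorem tok_digit (c : Char) (t' : List Char) (h : PySem.Chars.isdigit c = true) :
    tokenizerA (c :: t') =
      (c :: t'.takeWhile PySem.Chars.isdigit) :: tokenizerA (t'.dropWhile PySem.Chars.isdigit) := by
  rw [tokenizerA]
  rw [if_neg (by simp [List.take_succ_cons]; rintro rfl; exact absurd h (by decide)),
    if_neg (by simp [List.take_succ_cons]; rintro rfl; exact absurd h (by decide)),
    if_neg (by simp [List.take_succ_cons]; rintro rfl; exact absurd h (by decide)),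
    if_pos h]

theorem strIsdigit_run (c : Char) (t' : List Char) (h : PySem.Chars.isdigit c = true) :
    PySem.Chars.strIsdigit (c :: t'.takeWhile PySem.Chars.isdigit) = true := by
  simp [PySem.Chars.strIsdigit, h]

theorem isdigit_head_dropWhile {l : List Char} {e : Char} {t : List Char}
    (h : l.dropWhile PySem.Chars.isdigit = e :: t) : PySem.Chars.isdigit e = false := by
  have w : l.dropWhile PySem.Chars.isdigit ≠ [] := by rw [h]; simp
  have hh := List.head_dropWhile_not PySem.Chars.isdigit w
  simpa [h] using hh

-- a "mul(" token whose lookahead does not form the digits-comma-digits-paren pattern is skipped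
theorem parseA_mul_skip (force : Bool) (ts : List (List Char)) (en : Bool) (res : Int)
    (h : ∀ t1 t2 t3 t4 ts', ts = t1 :: t2 :: t3 :: t4 :: ts' →
      ¬(PySem.Chars.strIsdigit t1 = true ∧ t2 = [','] ∧
        PySem.Chars.strIsdigit t3 = true ∧ t4 = [')'])) :
    parseA force ("mul(".toList :: ts) en res = parseA force ts en res := by
  rcases ts with _ | ⟨t1, _ | ⟨t2, _ | ⟨t3, _ | ⟨t4, ts'⟩⟩⟩⟩
  · simp [parseA]
  · simp [parseA]
  · simp [parseA]
  · simp [parseA]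
  · have hc := h t1 t2 t3 t4 ts' rfl
    simp [parseA, hc]

-- evaluate tryMul just past a literal "mul(" prefix
theorem tryMul_mul (t : List Char) :
    tryMul ('m' :: 'u' :: 'l' :: '(' :: t) =
      (if t.takeWhile PySem.Chars.isdigit = [] then none
       else
         match t.dropWhile PySem.Chars.isdigit with
         | ',' :: t2 =>
           if t2.takeWhile PySem.Chars.isdigit = [] then none
           else
             match t2.dropWhile PySem.Chars.isdigit with
             | ')' :: t3 =>
               some (digitsVal (t.takeWhile PySem.Chars.isdigit) *
                 digitsVal (t2.takeWhile PySem.Chars.isdigit), t3)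
             | _ => none
         | _ => none) := by
  unfold tryMul
  rw [if_pos (by rw [PySem.Chars.startswith_iff]; exact ⟨t, rfl⟩)]
  simp only [List.drop_succ_cons, List.drop_zero]

-- the core: parsing "mul(" followed by the tokens of t  ≡  tryMul on the characters
theorem parseA_do (force : Bool) (ts : List (List Char)) (en : Bool) (res : Int) :
    parseA force ("do()".toList :: ts) en res = parseA force ts true res := by
  rcases ts with _ | ⟨t1, _ | ⟨t2, _ | ⟨t3, _ | ⟨t4, ts'⟩⟩⟩⟩ <;> simp [parseA]

theorem parseA_dont (force : Bool) (ts : List (List Char)) (en : Bool) (res : Int) :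
    parseA force ("don't()".toList :: ts) en res = parseA force ts false res := by
  rcases ts with _ | ⟨t1, _ | ⟨t2, _ | ⟨t3, _ | ⟨t4, ts'⟩⟩⟩⟩ <;> simp [parseA]

theorem mul_core (force : Bool) (t : List Char) (en : Bool) (res : Int) :
    parseA force ("mul(".toList :: tokenizerA t) en res =
      (match tryMul ('m' :: 'u' :: 'l' :: '(' :: t) with
       | some (v, r) => parseA force (tokenizerA r) en (if en || force then res + v else res)
       | none => parseA force (tokenizerA t) en res) := by
  rcases t with _ | ⟨c0, t'⟩
  · have htm : tryMul ['m', 'u', 'l', '('] = none := by rw [tryMul_mul]; simp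
    rw [htm]
    simp [parseA, tokenizerA]
  by_cases hc0 : PySem.Chars.isdigit c0 = true
  · rcases h2 : t'.dropWhile PySem.Chars.isdigit with _ | ⟨e, t3⟩
    · have htm : tryMul ('m' :: 'u' :: 'l' :: '(' :: c0 :: t') = none := by
        rw [tryMul_mul, List.takeWhile_cons_of_pos hc0, List.dropWhile_cons_of_pos hc0,
          if_neg (List.cons_ne_nil _ _), h2]
      rw [htm, tok_digit c0 t' hc0, h2]
      simp [parseA, tokenizerA]
    have he : PySem.Chars.isdigit e = false := isdigit_head_dropWhile h2
    by_cases hec : e = ','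
    · subst hec
      rcases t3 with _ | ⟨f, t4⟩
      · have htm : tryMul ('m' :: 'u' :: 'l' :: '(' :: c0 :: t') = none := by
          rw [tryMul_mul, List.takeWhile_cons_of_pos hc0, List.dropWhile_cons_of_pos hc0,
            if_neg (List.cons_ne_nil _ _), h2]
          simp
        rw [htm, tok_digit c0 t' hc0, h2,
          tok_single ([] : List Char) (by decide) (by decide) (by decide)]
        simp [parseA, tokenizerA]
      by_cases hf : PySem.Chars.isdigit f = true
      · rcases h4 : t4.dropWhile PySem.Chars.isdigit with _ | ⟨g, t5⟩
        · have htm : tryMul ('m' :: 'u' :: 'l' :: '(' :: c0 :: t') = none := by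
            rw [tryMul_mul, List.takeWhile_cons_of_pos hc0, List.dropWhile_cons_of_pos hc0,
              if_neg (List.cons_ne_nil _ _), h2]
            simp [List.takeWhile_cons_of_pos hf, List.dropWhile_cons_of_pos hf, h4]
          rw [htm, tok_digit c0 t' hc0, h2,
            tok_single (f :: t4) (by decide) (by decide) (by decide),
            tok_digit f t4 hf, h4]
          simp [parseA, tokenizerA]
        have hg : PySem.Chars.isdigit g = false := isdigit_head_dropWhile h4
        by_cases hgc : g = ')'
        · subst hgc
          have htm : tryMul ('m' :: 'u' :: 'l' :: '(' :: c0 :: t') =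
              some (digitsVal (c0 :: t'.takeWhile PySem.Chars.isdigit) *
                digitsVal (f :: t4.takeWhile PySem.Chars.isdigit), t5) := by
            rw [tryMul_mul, List.takeWhile_cons_of_pos hc0, List.dropWhile_cons_of_pos hc0,
              if_neg (List.cons_ne_nil _ _), h2]
            simp [List.takeWhile_cons_of_pos hf, List.dropWhile_cons_of_pos hf, h4]
          rw [htm, tok_digit c0 t' hc0, h2,
            tok_single (f :: t4) (by decide) (by decide) (by decide),
            tok_digit f t4 hf, h4, tok_single t5 (by decide) (by decide) (by decide)]
          simp [parseA, strIsdigit_run c0 t' hc0, strIsdigit_run f t4 hf]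
        · have htm : tryMul ('m' :: 'u' :: 'l' :: '(' :: c0 :: t') = none := by
            rw [tryMul_mul, List.takeWhile_cons_of_pos hc0, List.dropWhile_cons_of_pos hc0,
              if_neg (List.cons_ne_nil _ _), h2]
            simp only [List.takeWhile_cons_of_pos hf, List.dropWhile_cons_of_pos hf, h4]
            rw [if_neg (List.cons_ne_nil _ _)]
            split
            · rename_i t3' heq; exact absurd heq (by simp [hgc])
            · rfl
          obtain ⟨tk, tks, htk, hne⟩ := tok_head_ne_single g t5 ')' hgc
          rw [htm, tok_digit c0 t' hc0, h2,
            tok_single (f :: t4) (by decide) (by decide) (by decide),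
            tok_digit f t4 hf, h4, htk]
          exact parseA_mul_skip force _ en res
            (by
              intro t1 t2 t3' t4' ts' he'
              injection he' with e1 he'; injection he' with e2 he'
              injection he' with e3 he'; injection he' with e4 he'
              subst e4
              rintro ⟨-, -, -, rfl⟩
              exact hne rfl)
      · have htm : tryMul ('m' :: 'u' :: 'l' :: '(' :: c0 :: t') = none := by
          rw [tryMul_mul, List.takeWhile_cons_of_pos hc0, List.dropWhile_cons_of_pos hc0,
            if_neg (List.cons_ne_nil _ _), h2]
          simp [List.takeWhile_cons_of_neg hf]
        obtain ⟨tk, tks, htk, hdg⟩ := tok_head_not_digit f t4 (by simpa using hf)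
        rw [htm, tok_digit c0 t' hc0, h2,
          tok_single (f :: t4) (by decide) (by decide) (by decide), htk]
        exact parseA_mul_skip force _ en res
          (by
            intro t1 t2 t3' t4' ts' he'
            injection he' with e1 he'; injection he' with e2 he'
            injection he' with e3 he'
            subst e3
            rintro ⟨-, -, hcon, -⟩
            rw [hdg] at hcon; cases hcon)
    · have htm : tryMul ('m' :: 'u' :: 'l' :: '(' :: c0 :: t') = none := by
        rw [tryMul_mul, List.takeWhile_cons_of_pos hc0, List.dropWhile_cons_of_pos hc0,
          if_neg (List.cons_ne_nil _ _), h2]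
        split
        · rename_i t2' heq; exact absurd heq (by simp [hec])
        · rfl
      obtain ⟨tk, tks, htk, hne⟩ := tok_head_ne_single e t3 ',' hec
      rw [htm, tok_digit c0 t' hc0, h2, htk]
      exact parseA_mul_skip force _ en res
        (by
          intro t1 t2 t3' t4' ts' he'
          injection he' with e1 he'; injection he' with e2 he'
          subst e2
          rintro ⟨-, rfl, -⟩
          exact hne rfl)
  · have htm : tryMul ('m' :: 'u' :: 'l' :: '(' :: c0 :: t') = none := by
      rw [tryMul_mul, List.takeWhile_cons_of_neg (by simpa using hc0), if_pos rfl]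
    obtain ⟨tk, tks, htk, hdg⟩ := tok_head_not_digit c0 t' (by simpa using hc0)
    rw [htm, htk]
    exact parseA_mul_skip force _ en res
      (by
        intro t1 t2 t3' t4' ts' he'
        injection he' with e1 he'
        subst e1
        rintro ⟨hcon, -⟩
        rw [hdg] at hcon; cases hcon)

theorem parse_eq_scan (force : Bool) : ∀ (n : Nat) (s : List Char), s.length ≤ n →
    ∀ (en : Bool) (res : Int),
    parseA force (tokenizerA s) en res = scanB force s en res := by
  intro n
  induction n with
  | zero =>
    intro s hs en res
    obtain rfl : s = [] := List.length_eq_zero_iff.mp (Nat.le_zero.mp hs)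
    simp [tokenizerA, parseA, scanB]
  | succ n ih =>
    intro s hs en res
    rcases s with _ | ⟨c, rest⟩
    · simp [tokenizerA, parseA, scanB]
    by_cases hmul : (c :: rest).take 4 = "mul(".toList
    · obtain ⟨t, ht⟩ : ∃ t, c :: rest = 'm' :: 'u' :: 'l' :: '(' :: t := by
        refine ⟨(c :: rest).drop 4, ?_⟩
        conv_lhs => rw [← List.take_append_drop 4 (c :: rest), hmul]
        rfl
      have hlen3 : t.length + 3 ≤ n := by
        have h2 := congrArg List.length ht
        simp at h2 hs; omega
      have hlen : t.length ≤ n := by omega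
      rw [ht]
      have htok : tokenizerA ('m' :: 'u' :: 'l' :: '(' :: t) =
          "mul(".toList :: tokenizerA t := by
        rw [tokenizerA]; rfl
      rw [htok, mul_core]
      rcases hm : tryMul ('m' :: 'u' :: 'l' :: '(' :: t) with _ | ⟨v, r⟩
      · have hscan : scanB force ('m' :: 'u' :: 'l' :: '(' :: t) en res =
            scanB force t en res := by
          rw [scanB, hm]
          simp [sw_do_false, sw_dont_false, scanB_step]
        rw [hscan]
        simpa using ih t hlen en res
      · have hr : r.length ≤ n := by
          have := tryMul_length hm
          simp at this; omega
        have hscan : scanB force ('m' :: 'u' :: 'l' :: '(' :: t) en res =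
            scanB force r en (if en || force then res + v else res) := by
          rw [scanB, hm]
        rw [hscan]
        simpa using ih r hr en (if en || force then res + v else res)
    by_cases hdo : (c :: rest).take 4 = "do()".toList
    · obtain ⟨t, ht⟩ : ∃ t, c :: rest = 'd' :: 'o' :: '(' :: ')' :: t := by
        refine ⟨(c :: rest).drop 4, ?_⟩
        conv_lhs => rw [← List.take_append_drop 4 (c :: rest), hdo]
        rfl
      have hlen : t.length ≤ n := by
        have := congrArg List.length ht
        simp at this hs; omega
      rw [ht]
      have htok : tokenizerA ('d' :: 'o' :: '(' :: ')' :: t) =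
          "do()".toList :: tokenizerA t := by
        rw [tokenizerA]; rfl
      rw [htok, parseA_do]
      rw [scanB, tryMul_none_of_head _ (by decide)]
      rw [if_pos (show PySem.Chars.startswith ('d' :: 'o' :: '(' :: ')' :: t) "do()".toList = true
        from by rw [PySem.Chars.startswith_iff]; exact ⟨t, rfl⟩)]
      simp only [List.drop_succ_cons, List.drop_zero]
      exact ih t hlen true res
    by_cases hdont : (c :: rest).take 7 = "don't()".toList
    · obtain ⟨t, ht⟩ : ∃ t, c :: rest = 'd' :: 'o' :: 'n' :: '\'' :: 't' :: '(' :: ')' :: t := by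
        refine ⟨(c :: rest).drop 7, ?_⟩
        conv_lhs => rw [← List.take_append_drop 7 (c :: rest), hdont]
        rfl
      have hlen : t.length ≤ n := by
        have := congrArg List.length ht
        simp at this hs; omega
      rw [ht]
      have htok : tokenizerA ('d' :: 'o' :: 'n' :: '\'' :: 't' :: '(' :: ')' :: t) =
          "don't()".toList :: tokenizerA t := by
        rw [tokenizerA]; rfl
      rw [htok, parseA_dont]
      rw [scanB, tryMul_none_of_head _ (by decide)]
      rw [if_neg (show ¬PySem.Chars.startswith ('d' :: 'o' :: 'n' :: '\'' :: 't' :: '(' :: ')' :: t)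
            "do()".toList = true from fun hsw => by
          have h' := (startswith_iff_take _ _).1 hsw
          simp at h')]
      rw [if_pos (show PySem.Chars.startswith ('d' :: 'o' :: 'n' :: '\'' :: 't' :: '(' :: ')' :: t)
            "don't()".toList = true
        from by rw [PySem.Chars.startswith_iff]; exact ⟨t, rfl⟩)]
      simp only [List.drop_succ_cons, List.drop_zero]
      exact ih t hlen false res
    by_cases hdig : PySem.Chars.isdigit c = true
    · have hcm : c ≠ 'm' := by rintro rfl; exact absurd hdig (by decide)
      have hcd : c ≠ 'd' := by rintro rfl; exact absurd hdig (by decide)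
      rw [tok_digit c rest hdig]
      rw [parseA_skip force _ en res (by simp [hcd]) (by simp [hcd]) (by simp [hcm])]
      have hlen : (rest.dropWhile PySem.Chars.isdigit).length ≤ n := by
        have := List.length_dropWhile_le (p := PySem.Chars.isdigit) (l := rest)
        simp at hs; omega
      rw [ih _ hlen en res]
      rw [scanB_step force rest en res hcm hcd]
      exact (scanB_dropWhile_digits force rest en res).symm
    · rw [tokenizerA,
        if_neg hmul, if_neg hdo, if_neg hdont, if_neg (by simp [hdig])]
      rw [parseA_skip force _ en res (by simp) (by simp) (by simp)]
      have hswm : PySem.Chars.startswith (c :: rest) "mul(".toList = false := by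
        rw [Bool.eq_false_iff]; intro hsw
        exact hmul ((startswith_iff_take _ _).1 hsw)
      have htm : tryMul (c :: rest) = none := by
        unfold tryMul; rw [hswm]; rfl
      have hswd : PySem.Chars.startswith (c :: rest) "do()".toList = false := by
        rw [Bool.eq_false_iff]; intro hsw
        exact hdo ((startswith_iff_take _ _).1 hsw)
      have hswdt : PySem.Chars.startswith (c :: rest) "don't()".toList = false := by
        rw [Bool.eq_false_iff]; intro hsw
        exact hdont ((startswith_iff_take _ _).1 hsw)
      rw [scanB, htm, hswd, hswdt]
      simp only [Bool.false_eq_true, if_false]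
      have hlen : rest.length ≤ n := by simp at hs; omega
      exact ih rest hlen en res

theorem fold_eq (force : Bool) (lines : List String) : ∀ (st : Int × Bool),
    lines.foldl (fun st line => parseA force (tokenizerA line.toList) st.2 st.1) st =
    lines.foldl (fun st line => scanB force line.toList st.2 st.1) st := by
  induction lines with
  | nil => intro st; rfl
  | cons line rest ih =>
    intro st
    simp only [List.foldl_cons]
    rw [parse_eq_scan force line.toList.length line.toList le_rfl, ih]

-- ===== VERDICT (by name: the statement is the Claim_ definition above) =====
theorem sum_tokens_spec : Claim_equal_sum_tokens := by
  intro lines force _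
  unfold Spec_sum_tokens sum_tokens sum_tokens_alt
  rw [fold_eq]
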